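-- pv_equiv track=rewrite | github.com/xaviet/repo | t0fe/t0fe.py | press
-- ===== SOURCE A (Python) =====
-- def press(line):
--   pos=0
--   zero=0
--   while(pos<4):
--     if(line[pos]==0):
--       zero=pos if(pos<zero) else zero
--       pos+=1
--       continue
--     else:
--       if(line[zero]==0):
--         line[zero]=line[pos]
--         line[pos]=0
--       pos=zero+1
--       zero=pos
--   return(line)
-- ===== SOURCE B (Python) =====
-- def press(line):
--   vals = [line[i] for i in range(4) if line[i] != 0]
--   for i in range(4):
--     line[i] = vals[i] if i < len(vals) else 0
--   return line
-- ===== Notes on version B (the rewrite author's own statement) =====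
-- stated objective: simpler
-- what changed: Replaced A's two-pointer in-place swap/backtrack while-loop with a single filter of the non-zero values followed by a refill of the first four slots.
import Mathlib
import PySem

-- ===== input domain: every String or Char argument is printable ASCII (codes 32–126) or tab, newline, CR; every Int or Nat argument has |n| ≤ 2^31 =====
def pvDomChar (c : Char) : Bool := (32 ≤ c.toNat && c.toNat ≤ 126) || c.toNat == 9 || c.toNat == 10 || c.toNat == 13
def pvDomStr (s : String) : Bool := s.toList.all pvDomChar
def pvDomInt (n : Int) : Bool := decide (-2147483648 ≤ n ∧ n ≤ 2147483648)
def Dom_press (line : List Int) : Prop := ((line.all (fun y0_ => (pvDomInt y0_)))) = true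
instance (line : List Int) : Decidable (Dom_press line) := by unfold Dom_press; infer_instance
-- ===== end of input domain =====

-- B replaces A's two-pointer in-place swap loop with a filter-then-refill pass (simpler);
-- equivalence is about the return value (both Pythons mutate `line` identically in place).

-- ===== PORT A =====
-- A's while-loop as recursion on (pos, zro); indices are in range under Pre_press
-- (4 ≤ line.length), so line.getD is exact there.
def pressLoop (line : List Int) (pos zro : Nat) : List Int :=
  if hp : pos < 4 then
    if line.getD pos 0 = 0 then
      pressLoop line (pos + 1) (if pos < zro then pos else zro)
    else
      let line' := if line.getD zro 0 = 0 then (line.set zro (line.getD pos 0)).set pos 0 else line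
      pressLoop line' (zro + 1) (zro + 1)
  else line
termination_by 5 * (4 - min pos zro) + (4 - pos)
decreasing_by all_goals simp only [Nat.min_def]; split_ifs <;> omega

def press (line : List Int) : List Int := pressLoop line 0 0

-- ===== PORT B =====
def press_alt (line : List Int) : List Int :=
  let vals := (List.range 4).filterMap (fun i => let v := line.getD i 0; if v ≠ 0 then some v else none)
  (List.range 4).foldl (fun acc i => acc.set i (vals.getD i 0)) line

-- ===== PRECONDITION & SPEC =====
-- Pre_ excludes lists shorter than 4, on which Python A (and B) raise IndexError.
def Pre_press (line : List Int) : Prop := 4 ≤ line.length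
instance (line : List Int) : Decidable (Pre_press line) := by unfold Pre_press; infer_instance
def pvWitness_press : List Int := [1, 0, 2, 0]

def Spec_press (line : List Int) (out : List Int) : Prop := out = press_alt line
instance (line : List Int) (out : List Int) : Decidable (Spec_press line out) := by unfold Spec_press; infer_instance

-- ===== CLAIM (what is proved, stated in full; the proofs are below) =====
def Claim_equal_press : Prop := ∀ (line : List Int), Dom_press line → Pre_press line → Spec_press line (press line)

-- ===== LEMMAS AND PROOFS =====

theorem press_case (a b c d : Int) (rest : List Int) :
    press (a :: b :: c :: d :: rest) = press_alt (a :: b :: c :: d :: rest) := by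
  by_cases ha : a = 0 <;> by_cases hb : b = 0 <;> by_cases hc : c = 0 <;> by_cases hd : d = 0 <;>
    simp [press, press_alt, pressLoop, ha, hb, hc, hd, List.range_succ]

-- ===== VERDICT (by name: the statement is the Claim_ definition above) =====
theorem press_spec : Claim_equal_press := by
  intro line _ hpre
  unfold Spec_press
  match line, hpre with
  | a :: b :: c :: d :: rest, _ => exact press_case a b c d rest
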